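-- pv_equiv track=rewrite | github.com/JCZentrovia/RITDOCXMLConverter | tools/models/train_layout_classifier.py | autodetect_field
-- ===== SOURCE A (Python) =====
-- def _lower_keys(d):
--     return {k.lower(): k for k in d.keys()}
--
-- def autodetect_field(records, candidates):
--     """
--     Find the first candidate that appears (case-insensitively) in any record.
--     Returns the original-cased key, or None if not found.
--     """
--     for cand in candidates:
--         cand_l = cand.lower()
--         for r in records:
--             lk = _lower_keys(r)
--             if cand_l in lk:
--                 return lk[cand_l]
--     return None
-- ===== SOURCE B (Python) =====
-- def autodetect_field(records, candidates):
--     """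
--     Find the first candidate that appears (case-insensitively) in any record.
--     Returns the original-cased key, or None if not found.
--     """
--     combined = {}
--     for r in records:
--         lower_map = {k.lower(): k for k in r}
--         for lk, orig in lower_map.items():
--             combined.setdefault(lk, orig)
--     for cand in candidates:
--         cand_l = cand.lower()
--         if cand_l in combined:
--             return combined[cand_l]
--     return None
-- ===== Notes on version B (the rewrite author's own statement) =====
-- stated objective: alternative
-- what changed: Instead of rescanning all records for every candidate, B builds one combined lowercase-key index in a single pass over records (per-record lower map merged with setdefault so the first record wins) and then answers each candidate with a single dictionary lookup; unlike A it never short-circuits, so it is not faster, just a different algorithm.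
import Mathlib
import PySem

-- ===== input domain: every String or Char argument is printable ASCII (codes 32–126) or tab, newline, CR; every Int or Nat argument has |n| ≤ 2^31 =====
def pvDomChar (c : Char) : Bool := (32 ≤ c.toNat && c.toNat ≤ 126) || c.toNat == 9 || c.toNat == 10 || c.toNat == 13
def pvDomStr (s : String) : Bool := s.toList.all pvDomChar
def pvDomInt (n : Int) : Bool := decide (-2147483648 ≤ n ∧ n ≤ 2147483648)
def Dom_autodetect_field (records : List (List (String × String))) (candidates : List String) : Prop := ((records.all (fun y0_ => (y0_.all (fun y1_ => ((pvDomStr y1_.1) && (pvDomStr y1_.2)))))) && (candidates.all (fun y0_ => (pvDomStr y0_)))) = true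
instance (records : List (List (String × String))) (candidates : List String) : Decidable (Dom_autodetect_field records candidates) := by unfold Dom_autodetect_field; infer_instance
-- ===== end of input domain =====

-- B builds one combined lowercase-key index over all records and then looks each candidate up once,
-- instead of rebuilding every record's lower-map for every candidate (objective: alternative algorithm).


-- ===== PORT A =====
-- {k.lower(): k for k in d.keys()} — this comprehension appears verbatim in A (_lower_keys) and in B
-- (lower_map), so both ports share it; a record reaches Python as a dict, so its keys are the distinct
-- keys of the association list in first-occurrence order.
def lowerKeys (r : List (String × String)) : PySem.Dict String String :=
  (PySem.Dict.ofList r).keys.foldl (fun d k => d.insert (PySem.Str.lower k) k) PySem.Dict.empty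

-- inner loop 'for r in records: …' for a fixed lowered candidate (early return on hit)
def scanRecordsA (candL : String) : List (List (String × String)) → Option String
  | [] => none
  | r :: rs =>
      match (lowerKeys r).get? candL with
      | some v => some v
      | none => scanRecordsA candL rs

-- outer loop 'for cand in candidates: …'
def loopCandsA (records : List (List (String × String))) : List String → Option String
  | [] => none
  | cand :: rest =>
      match scanRecordsA (PySem.Str.lower cand) records with
      | some v => some v
      | none => loopCandsA records rest

def autodetect_field (records : List (List (String × String))) (candidates : List String) : Option String :=
  loopCandsA records candidates

-- ===== PORT B =====
-- combined index: per record merge its lower_map with setdefault (first record wins)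
def buildCombinedB (records : List (List (String × String))) : PySem.Dict String String :=
  records.foldl
    (fun comb r => (lowerKeys r).items.foldl (fun c kv => c.setdefault kv.1 kv.2) comb)
    PySem.Dict.empty

-- final pass: first candidate whose lowercase is in the index
def lookupCandsB (comb : PySem.Dict String String) : List String → Option String
  | [] => none
  | cand :: rest =>
      match comb.get? (PySem.Str.lower cand) with
      | some v => some v
      | none => lookupCandsB comb rest

def autodetect_field_alt (records : List (List (String × String))) (candidates : List String) : Option String :=
  lookupCandsB (buildCombinedB records) candidates

-- ===== PRECONDITION & SPEC =====
def Spec_autodetect_field (records : List (List (String × String))) (candidates : List String) (out : Option String) : Prop := out = autodetect_field_alt records candidates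
instance (records : List (List (String × String))) (candidates : List String) (out : Option String) : Decidable (Spec_autodetect_field records candidates out) := by unfold Spec_autodetect_field; infer_instance

-- ===== CLAIM (what is proved, stated in full; the proofs are below) =====
def Claim_equal_autodetect_field : Prop := ∀ (records : List (List (String × String))) (candidates : List String), Dom_autodetect_field records candidates → Spec_autodetect_field records candidates (autodetect_field records candidates)

-- ===== LEMMAS AND PROOFS =====

-- setdefault at one key, seen through get?
lemma get?_setdefault (c : PySem.Dict String String) (k v : String) (x : String) :
    (c.setdefault k v).get? x =
      match c.get? x with
      | some w => some w
      | none => if k = x then some v else none := by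
  by_cases h : c.contains k
  · rw [PySem.Dict.setdefault_of_contains c v h]
    cases hx : c.get? x with
    | some w => simp
    | none =>
        simp only
        by_cases hkx : k = x
        · subst hkx
          rw [PySem.Dict.get?_eq_none_iff_contains] at hx
          simp [h] at hx
        · simp [hkx]
  · rw [PySem.Dict.setdefault_of_not_contains c v (by simpa using h)]
    rw [PySem.Dict.get?_insert]
    cases hx : c.get? x with
    | some w =>
        by_cases hkx : x = k
        · subst hkx
          rw [PySem.Dict.contains_eq_isSome_get?, hx] at h
          simp at h
        · simp [hkx, hx]
    | none =>
        by_cases hkx : x = k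
        · simp [hkx, hx]
        · have hkx' : ¬ k = x := fun h' => hkx h'.symm
          simp [hkx, hkx', hx]

-- folding setdefault over an association list, seen through get?: first the accumulator, then first match in the list
lemma get?_fold_setdefault (l : List (String × String)) (comb : PySem.Dict String String) (x : String) :
    (l.foldl (fun c kv => c.setdefault kv.1 kv.2) comb).get? x =
      match comb.get? x with
      | some w => some w
      | none => (PySem.Dict.mk l).get? x := by
  induction l generalizing comb with
  | nil =>
      simp only [List.foldl_nil]
      cases h : comb.get? x <;>
        simp [h, show (PySem.Dict.mk ([] : List (String × String))).get? x = none from rfl]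
  | cons kv rest ih =>
      simp only [List.foldl_cons]
      rw [ih, get?_setdefault]
      rw [PySem.Dict.get?_mk_cons]
      cases h : comb.get? x with
      | some w => simp
      | none =>
          by_cases hkx : kv.1 = x
          · simp [hkx]
          · simp [hkx, fun h' : (kv.1 == x) = true => hkx (by simpa using h')]

-- the combined index, seen through get?, is exactly A's record scan
lemma get?_buildCombined (records : List (List (String × String))) (x : String) :
    (buildCombinedB records).get? x = scanRecordsA x records := by
  suffices h : ∀ (recs : List (List (String × String))) (comb : PySem.Dict String String),
      (recs.foldl (fun comb r => (lowerKeys r).items.foldl (fun c kv => c.setdefault kv.1 kv.2) comb) comb).get? x =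
        match comb.get? x with
        | some w => some w
        | none => scanRecordsA x recs by
    rw [buildCombinedB, h]
    simp [PySem.Dict.get?_empty]
  intro recs
  induction recs with
  | nil =>
      intro comb
      simp only [List.foldl_nil]
      cases h : comb.get? x <;> simp [h, scanRecordsA]
  | cons r rs ih =>
      intro comb
      simp only [List.foldl_cons]
      rw [ih, get?_fold_setdefault]
      have hmk : PySem.Dict.mk (lowerKeys r).items = lowerKeys r := rfl
      rw [hmk]
      cases h : comb.get? x with
      | some w => simp
      | none => cases hr : (lowerKeys r).get? x <;> simp [scanRecordsA, hr]

-- both candidate loops agree once the index lookup is known to equal A's record scan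
lemma loop_eq (records : List (List (String × String))) (candidates : List String) :
    loopCandsA records candidates = lookupCandsB (buildCombinedB records) candidates := by
  induction candidates with
  | nil => rfl
  | cons cand rest ih =>
      simp only [loopCandsA, lookupCandsB, get?_buildCombined]
      cases h : scanRecordsA (PySem.Str.lower cand) records <;> simp [h, ih]

-- ===== VERDICT (by name: the statement is the Claim_ definition above) =====
theorem autodetect_field_spec : Claim_equal_autodetect_field := by
  intro records candidates _
  show autodetect_field records candidates = autodetect_field_alt records candidates
  exact loop_eq records candidates
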